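-- pv_equiv track=rewrite | github.com/darrenjss/coding_test | CodingTest.py | transform_letters
-- ===== SOURCE A (Python) =====
-- def transform_letters(text):
--     result = ""
--
--     for i in range(len(text)):
--         if i % 3 == 0:
--             result += text[i]
--         elif i % 3 == 1:
--             result += 'B'
--         else:
--             result += 'E'
--
--     return result
-- ===== SOURCE B (Python) =====
-- def transform_letters(text):
--     parts = []
--     for start in range(0, len(text), 3):
--         chunk = text[start:start + 3]
--         parts.append(chunk[0])
--         if len(chunk) > 1:
--             parts.append('B')
--         if len(chunk) > 2:
--             parts.append('E')
--     return ''.join(parts)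
-- ===== Notes on version B (the rewrite author's own statement) =====
-- stated objective: alternative
-- what changed: B walks the text in slices of three characters (keep head, then append 'B'/'E' guarded by chunk length) and joins a list at the end, instead of testing every index against i % 3 and growing a string by +=.
import Mathlib
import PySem

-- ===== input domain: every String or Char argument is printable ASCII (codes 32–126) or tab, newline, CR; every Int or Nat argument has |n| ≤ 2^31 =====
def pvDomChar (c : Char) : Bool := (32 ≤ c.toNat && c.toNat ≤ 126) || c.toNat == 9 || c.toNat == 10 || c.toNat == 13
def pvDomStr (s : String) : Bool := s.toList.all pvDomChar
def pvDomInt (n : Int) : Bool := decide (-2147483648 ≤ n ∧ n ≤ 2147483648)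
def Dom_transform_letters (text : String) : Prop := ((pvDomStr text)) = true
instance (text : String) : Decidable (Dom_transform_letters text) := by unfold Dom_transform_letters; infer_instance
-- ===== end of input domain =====

-- B walks the text in chunks of three characters instead of branching on i % 3; same output, same cost (objective: alternative).

-- ===== PORT A =====
-- for i in range(len(text)): branch on i % 3, appending text[i] / 'B' / 'E' to a string accumulator
def transform_letters (text : String) : String :=
  (PySem.List.enumerate text.toList 0).foldl
    (fun result p =>
      result ++ (if p.1 % 3 == 0 then String.ofList [p.2]
                 else if p.1 % 3 == 1 then "B" else "E")) ""

-- ===== PORT B =====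
-- one step per chunk of up to three characters: keep the head, 'B' if len(chunk) > 1, 'E' if len(chunk) > 2
def pvChunkGo : List Char → List Char
  | [] => []
  | [a] => [a]
  | [a, _] => [a, 'B']
  | a :: _ :: _ :: rest => a :: 'B' :: 'E' :: pvChunkGo rest

def transform_letters_alt (text : String) : String := String.ofList (pvChunkGo text.toList)

-- ===== PRECONDITION & SPEC =====
def Spec_transform_letters (text : String) (out : String) : Prop := out = transform_letters_alt text
instance (text : String) (out : String) : Decidable (Spec_transform_letters text out) := by unfold Spec_transform_letters; infer_instance

-- ===== CLAIM (what is proved, stated in full; the proofs are below) =====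
def Claim_equal_transform_letters : Prop := ∀ (text : String), Dom_transform_letters text → Spec_transform_letters text (transform_letters text)

-- ===== LEMMAS AND PROOFS =====

-- what A's loop produces for the suffix starting at index k
def pvIdxGo (k : Int) : List Char → List Char
  | [] => []
  | c :: cs => (if k % 3 == 0 then c else if k % 3 == 1 then 'B' else 'E') :: pvIdxGo (k + 1) cs

theorem pvMkAppend (a b : List Char) : String.ofList a ++ String.ofList b = String.ofList (a ++ b) := by simp

theorem pvFoldA (l : List Char) : ∀ (k : Int) (acc : String),
    (PySem.List.enumerate l k).foldl
      (fun result p =>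
        result ++ (if p.1 % 3 == 0 then String.ofList [p.2]
                   else if p.1 % 3 == 1 then "B" else "E")) acc
    = acc ++ String.ofList (pvIdxGo k l) := by
  induction l with
  | nil => intro k acc; simp [PySem.List.enumerate_nil, pvIdxGo]
  | cons c cs ih =>
    intro k acc
    rw [PySem.List.enumerate_cons, List.foldl_cons, ih]
    show (acc ++ _) ++ String.ofList (pvIdxGo (k + 1) cs) = _
    by_cases h0 : k % 3 == 0
    · simp only [pvIdxGo, h0, if_pos]
      rw [String.append_assoc, pvMkAppend]; rfl
    · by_cases h1 : k % 3 == 1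
      · simp only [pvIdxGo, h0, h1, if_neg, if_pos, Bool.false_eq_true, not_false_iff]
        show (acc ++ String.ofList ['B']) ++ _ = _
        rw [String.append_assoc, pvMkAppend]; rfl
      · simp only [pvIdxGo, h0, h1, if_neg, Bool.false_eq_true, not_false_iff]
        show (acc ++ String.ofList ['E']) ++ _ = _
        rw [String.append_assoc, pvMkAppend]; rfl

theorem pvIdxGo_eq_chunk : ∀ (l : List Char) (k : Int), k % 3 = 0 → pvIdxGo k l = pvChunkGo l := by
  intro l
  induction l using pvChunkGo.induct with
  | case1 => intro k _; rfl
  | case2 a =>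
    intro k hk
    simp [pvIdxGo, pvChunkGo, hk]
  | case3 a b =>
    intro k hk
    have h1 : (k + 1) % 3 = 1 := by omega
    simp [pvIdxGo, pvChunkGo, hk, h1]
  | case4 a b c rest ih =>
    intro k hk
    have h1 : (k + 1) % 3 = 1 := by omega
    have h2 : (k + 1 + 1) % 3 = 2 := by omega
    have h3 : (k + 1 + 1 + 1) % 3 = 0 := by omega
    simp [pvIdxGo, pvChunkGo, hk, h1, h2, ih _ h3]

-- ===== VERDICT (by name: the statement is the Claim_ definition above) =====
theorem transform_letters_spec : Claim_equal_transform_letters := by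
  intro text _
  unfold Spec_transform_letters transform_letters transform_letters_alt
  rw [pvFoldA, pvIdxGo_eq_chunk _ 0 rfl]
  rfl
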